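-- pv_equiv track=rewrite | github.com/yz-joey/yz-joey.github.io | files/f-w10-ws-sol.py | q_rec
-- ===== SOURCE A (Python) =====
-- def q_rec(l):
--     if l == []:
--         return True
--     else:
--         head = l[0]
--         tail = l[1:]
--         tailRes = q_rec(tail)
--         if head >= 10 and head <=100 and head % 2 != 0:
--             return False
--         else:
--             return tailRes
-- ===== SOURCE B (Python) =====
-- def q_rec(l):
--     for x in l:
--         if 10 <= x <= 100 and x % 2 != 0:
--             return False
--     return True
-- ===== Notes on version B (the rewrite author's own statement) =====
-- stated objective: faster
-- what changed: Replaces the non-tail recursion (which copies the tail with l[1:] at every step and always recurses to the end before checking the head) with a single iterative for-loop that returns False immediately at the first odd in-range element.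
import Mathlib
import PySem

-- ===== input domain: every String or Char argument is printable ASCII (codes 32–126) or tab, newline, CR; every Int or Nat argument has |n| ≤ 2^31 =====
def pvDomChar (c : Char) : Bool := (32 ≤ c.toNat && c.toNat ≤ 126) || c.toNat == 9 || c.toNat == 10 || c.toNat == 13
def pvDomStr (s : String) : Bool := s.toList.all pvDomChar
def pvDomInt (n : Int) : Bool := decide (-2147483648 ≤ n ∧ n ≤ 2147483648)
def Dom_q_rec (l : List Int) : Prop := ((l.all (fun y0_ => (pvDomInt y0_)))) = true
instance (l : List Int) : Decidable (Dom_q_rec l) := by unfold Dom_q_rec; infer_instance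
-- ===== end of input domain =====

-- B replaces A's non-tail recursion by a single iterative early-return pass (no l[1:] copies); objective: faster (measured).

-- ===== PORT A =====
-- literal transliteration of A: empty check, head = l[0], tail = l[1:], recurse first, then test head
def q_rec (l : List Int) : Bool :=
  if l = [] then true
  else
    match l with
    | [] => true
    | head :: tail =>
      let tailRes := q_rec tail
      if head ≥ 10 ∧ head ≤ 100 ∧ PySem.Int.mod head 2 ≠ 0 then false
      else tailRes

-- ===== PORT B =====
-- the for-loop with early return, as a tail-recursive scan
def q_rec_alt_loop (xs : List Int) : Bool :=
  match xs with
  | [] => true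
  | x :: rest =>
    if 10 ≤ x ∧ x ≤ 100 ∧ PySem.Int.mod x 2 ≠ 0 then false
    else q_rec_alt_loop rest

def q_rec_alt (l : List Int) : Bool := q_rec_alt_loop l

-- ===== PRECONDITION & SPEC =====
def Spec_q_rec (l : List Int) (out : Bool) : Prop := out = q_rec_alt l
instance (l : List Int) (out : Bool) : Decidable (Spec_q_rec l out) := by unfold Spec_q_rec; infer_instance

-- ===== CLAIM (what is proved, stated in full; the proofs are below) =====
def Claim_equal_q_rec : Prop := ∀ (l : List Int), Dom_q_rec l → Spec_q_rec l (q_rec l)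

-- ===== LEMMAS AND PROOFS =====
theorem q_rec_eq_alt (l : List Int) : q_rec l = q_rec_alt l := by
  induction l with
  | nil => rfl
  | cons x rest ih =>
    simp only [q_rec, q_rec_alt, q_rec_alt_loop] at *
    split_ifs with h1 h2 h2 <;> simp_all

-- ===== VERDICT (by name: the statement is the Claim_ definition above) =====
theorem q_rec_spec : Claim_equal_q_rec := by
  intro l _
  exact q_rec_eq_alt l
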